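-- pv_equiv track=rewrite | github.com/ntaraujo/killer | src/utils.py | github_version_tag
-- ===== SOURCE A (Python) =====
-- from typing import Union, Dict, Callable, Any, List, Optional, Type, Collection, Tuple
--
-- def github_version_tag(xyz: Tuple[int, int, int, int]):
--     versioned = []
--     zero_removed = False
--     for component in xyz[::-1]:
--         if component >= 1 or zero_removed:
--             zero_removed = True
--             versioned.insert(0, str(component))
--     return 'v' + '.'.join(versioned)
-- ===== SOURCE B (Python) =====
-- def github_version_tag(xyz):
--     last = -1
--     for i, c in enumerate(xyz):
--         if c >= 1:
--             last = i
--     return 'v' + '.'.join(str(c) for c in xyz[:last + 1])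
-- ===== Notes on version B (the rewrite author's own statement) =====
-- stated objective: simpler
-- what changed: Instead of scanning the reversed tuple with a zero_removed flag and front-inserting into a list, B computes the last index with component >= 1 in one forward pass and formats the prefix slice directly.
import Mathlib
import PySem

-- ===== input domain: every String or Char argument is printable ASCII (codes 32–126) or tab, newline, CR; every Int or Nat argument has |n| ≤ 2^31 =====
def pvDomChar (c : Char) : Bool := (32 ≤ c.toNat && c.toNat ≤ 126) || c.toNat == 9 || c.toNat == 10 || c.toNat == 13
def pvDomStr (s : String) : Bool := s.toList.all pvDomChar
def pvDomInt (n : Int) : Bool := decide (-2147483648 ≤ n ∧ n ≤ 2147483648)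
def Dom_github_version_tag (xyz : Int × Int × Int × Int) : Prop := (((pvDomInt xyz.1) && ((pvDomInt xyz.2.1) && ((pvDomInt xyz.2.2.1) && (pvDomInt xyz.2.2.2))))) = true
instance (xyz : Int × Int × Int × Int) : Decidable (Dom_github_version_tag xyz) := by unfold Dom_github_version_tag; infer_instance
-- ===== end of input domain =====

-- B drops the zero_removed flag and front-insertion: it finds the last component >= 1 and joins the prefix slice (objective: simpler).

-- ===== PORT A =====
-- literal port: reversed scan with (versioned, zero_removed) state, insert at position 0
def github_version_tag (xyz : Int × Int × Int × Int) : String :=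
  let lst : List Int := [xyz.1, xyz.2.1, xyz.2.2.1, xyz.2.2.2]
  let rev : List Int := (PySem.List.slice? lst none none (-1)).getD []
  let st : List String × Bool :=
    rev.foldl (fun (s : List String × Bool) component =>
      if component ≥ 1 || s.2 then
        (PySem.List.insert s.1 0 (PySem.Int.toStr component), true)
      else s) ([], false)
  "v" ++ PySem.Str.join "." st.1

-- ===== PORT B =====
-- literal port of Source B: forward pass keeping the last index with c >= 1, then join the slice xyz[:last+1]
def github_version_tag_alt (xyz : Int × Int × Int × Int) : String :=
  let lst : List Int := [xyz.1, xyz.2.1, xyz.2.2.1, xyz.2.2.2]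
  let last : Int :=
    (PySem.List.enumerate lst).foldl (fun (m : Int) p => if p.2 ≥ 1 then p.1 else m) (-1)
  "v" ++ PySem.Str.join "." ((PySem.List.slice lst none (some (last + 1))).map PySem.Int.toStr)

-- ===== PRECONDITION & SPEC =====
def Spec_github_version_tag (xyz : Int × Int × Int × Int) (out : String) : Prop := out = github_version_tag_alt xyz
instance (xyz : Int × Int × Int × Int) (out : String) : Decidable (Spec_github_version_tag xyz out) := by unfold Spec_github_version_tag; infer_instance

-- ===== CLAIM (what is proved, stated in full; the proofs are below) =====
def Claim_equal_github_version_tag : Prop := ∀ (xyz : Int × Int × Int × Int), Dom_github_version_tag xyz → Spec_github_version_tag xyz (github_version_tag xyz)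

-- ===== LEMMAS AND PROOFS =====

-- ===== VERDICT (by name: the statement is the Claim_ definition above) =====
theorem github_version_tag_spec : Claim_equal_github_version_tag := by
  intro ⟨a, b, c, d⟩ _
  unfold Spec_github_version_tag github_version_tag github_version_tag_alt
  simp only [PySem.List.slice?_none_none_neg_one, Option.getD_some, List.reverse_cons,
    List.reverse_nil, List.nil_append, List.cons_append, List.foldl_cons, List.foldl_nil,
    PySem.List.enumerate_cons, PySem.List.enumerate_nil]
  by_cases h1 : (1:Int) ≤ a <;> by_cases h2 : (1:Int) ≤ b <;>
    by_cases h3 : (1:Int) ≤ c <;> by_cases h4 : (1:Int) ≤ d <;>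
    simp [h1, h2, h3, h4, PySem.List.insert_zero, PySem.List.slice, PySem.List.clampIdx,
      PySem.Str.join, PySem.Int.toList_toStr]
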